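-- pv_equiv track=rewrite | github.com/ByeongjunCho/TIL | 알고리즘공부/프로그래머스/SkillTree.py | check_
-- ===== SOURCE A (Python) =====
-- def check_(le1):
--     for i in range(len(le1) -1):
--         if le1[i+1] - le1[i] < 0 and le1[i] >= 0 and le1[i+1] >= 0: # 오름차순이 아니면서 -1이 없는 경우
--             return 0
--         elif le1[i] < 0 or le1[i+1] < 0:  # -1이 있다면 뒤 모든것이 -1인지 확인한다.
--             for j in range(i+1, len(le1)):
--                 if le1[j] != -1:
--                     return 0
--             return 1
--     else:
--         return 1
-- ===== SOURCE B (Python) =====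
-- def check_(le1):
--     f = next((k for k, v in enumerate(le1) if v < 0), len(le1))
--     prefix = le1[:f]
--     if any(x > y for x, y in zip(prefix, prefix[1:])):
--         return 0
--     return 1 if all(v == -1 for v in le1[f:]) else 0
-- ===== Notes on version B (the rewrite author's own statement) =====
-- stated objective: simpler
-- what changed: Replaced A's fused index loop with early returns and a nested sentinel-scan by three flat passes: locate the first negative element, check the prefix before it for a descending pair, and check that everything from it on is -1.
-- intended difference: On nonempty lists whose first element is negative but not -1 while every later element is -1, A returns 1 because its pair loop never inspects a negative element at index 0, while B returns 0, the intended value since the trailing sentinel region must consist of -1 only. — e.g. on check_([-5]): A returns 1, B returns 0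
import Mathlib
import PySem

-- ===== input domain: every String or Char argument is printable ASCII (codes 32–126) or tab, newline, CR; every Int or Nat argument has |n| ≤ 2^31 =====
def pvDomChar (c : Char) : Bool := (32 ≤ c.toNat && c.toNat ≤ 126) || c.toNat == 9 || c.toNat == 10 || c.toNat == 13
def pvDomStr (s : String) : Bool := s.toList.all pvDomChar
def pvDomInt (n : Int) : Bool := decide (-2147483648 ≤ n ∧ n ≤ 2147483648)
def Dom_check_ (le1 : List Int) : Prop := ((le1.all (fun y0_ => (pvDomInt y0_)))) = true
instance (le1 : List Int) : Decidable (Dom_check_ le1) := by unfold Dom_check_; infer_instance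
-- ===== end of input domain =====

-- B replaces A's fused index loop (early returns + nested sentinel scan) by three flat passes:
-- first negative index, prefix descent check, all -1 tail check. Objective: simpler.
-- A and B differ (D_ below) when the first element is negative but not -1 and the rest are -1.

-- ===== PORT A =====
-- inner loop: for j in range(i+1, len(le1)): if le1[j] != -1: return 0; return 1
def checkInnerA (le1 : List Int) : List Int → Int
  | [] => 1
  | j :: js => if PySem.List.pyGetD le1 j 0 ≠ -1 then 0 else checkInnerA le1 js

-- outer loop over i ∈ range(len(le1)-1)
def checkLoopA (le1 : List Int) : List Int → Int
  | [] => 1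
  | i :: is =>
    if PySem.List.pyGetD le1 (i+1) 0 - PySem.List.pyGetD le1 i 0 < 0 ∧
       0 ≤ PySem.List.pyGetD le1 i 0 ∧ 0 ≤ PySem.List.pyGetD le1 (i+1) 0 then 0
    else if PySem.List.pyGetD le1 i 0 < 0 ∨ PySem.List.pyGetD le1 (i+1) 0 < 0 then
      checkInnerA le1 (PySem.List.pyRange (i+1) (PySem.List.len le1) 1)
    else checkLoopA le1 is

def check_ (le1 : List Int) : Int :=
  checkLoopA le1 (PySem.List.pyRange 0 (PySem.List.len le1 - 1) 1)

-- ===== PORT B =====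
-- f = next((k for k,v in enumerate(le1) if v < 0), len(le1)) ported as findIdx? + getD;
-- le1[:f] is List.take, prefix[1:] is List.drop 1, le1[f:] is List.drop f.
def check__alt (le1 : List Int) : Int :=
  let f := (le1.findIdx? (fun v => decide (v < 0))).getD le1.length
  let pre := le1.take f
  if (pre.zip (pre.drop 1)).any (fun p => decide (p.1 > p.2)) then 0
  else if (le1.drop f).all (fun v => v == -1) then 1 else 0

-- ===== PRECONDITION & SPEC =====
-- On nonempty lists whose first element is negative but not -1 while every later element is -1,
-- A returns 1 (its pair loop never inspects a negative element at index 0), B returns 0, the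
-- intended value since the trailing sentinel region must consist of -1 only.
def D_check_ (le1 : List Int) : Prop :=
  le1 ≠ [] ∧ le1.headD 0 < 0 ∧ le1.headD 0 ≠ -1 ∧ (le1.tail.all (fun v => v == -1)) = true
instance (le1 : List Int) : Decidable (D_check_ le1) := by unfold D_check_; infer_instance

def Spec_check_ (le1 : List Int) (out : Int) : Prop := ¬ D_check_ le1 → out = check__alt le1
instance (le1 : List Int) (out : Int) : Decidable (Spec_check_ le1 out) := by unfold Spec_check_; infer_instance

def pvDiffWitness_check_ : List Int := [-5]
def pvDiffWitnessOut_check_ : Int × Int := (1, 0)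

-- ===== CLAIM (what is proved, stated in full; the proofs are below) =====
def Claim_unchanged_check_ : Prop := ∀ (le1 : List Int), Dom_check_ le1 → Spec_check_ le1 (check_ le1)
def Claim_changed_check_ : Prop := Dom_check_ (pvDiffWitness_check_) ∧ D_check_ (pvDiffWitness_check_) ∧ check_ (pvDiffWitness_check_) = pvDiffWitnessOut_check_.1 ∧ check__alt (pvDiffWitness_check_) = pvDiffWitnessOut_check_.2 ∧ pvDiffWitnessOut_check_.1 ≠ pvDiffWitnessOut_check_.2
def Claim_exact_check_ : Prop := ∀ (le1 : List Int), Dom_check_ le1 → D_check_ le1 → check_ le1 ≠ check__alt le1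

-- ===== LEMMAS AND PROOFS =====

-- structural characterisation of A's fused loop
def gSpec : List Int → Int
  | [] => 1
  | [_] => 1
  | a :: b :: t =>
    if b - a < 0 ∧ 0 ≤ a ∧ 0 ≤ b then 0
    else if a < 0 ∨ b < 0 then (if (b :: t).all (fun v => v == -1) then 1 else 0)
    else gSpec (b :: t)

lemma pyRange_nil_of_le (a b : Int) (h : b ≤ a) : PySem.List.pyRange a b 1 = [] := by
  rw [PySem.List.pyRange_one]
  have : (b - a).toNat = 0 := by omega
  simp [this]

lemma innerA_eq (le1 : List Int) : ∀ (fuel j : Nat), le1.length - j = fuel →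
    checkInnerA le1 (PySem.List.pyRange (j : Int) (PySem.List.len le1) 1) =
      if (le1.drop j).all (fun v => v == -1) then 1 else 0 := by
  intro fuel
  induction fuel with
  | zero =>
    intro j hj
    have hge : le1.length ≤ j := by omega
    rw [pyRange_nil_of_le _ _ (by simp [PySem.List.len_eq]; exact_mod_cast hge)]
    simp [checkInnerA, List.drop_eq_nil_of_le hge]
  | succ n ih =>
    intro j hj
    have hlt : j < le1.length := by omega
    have hcons : PySem.List.pyRange (j : Int) (PySem.List.len le1) 1
        = (j : Int) :: PySem.List.pyRange ((j : Int) + 1) (PySem.List.len le1) 1 := by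
      apply PySem.List.pyRange_one_cons
      simp [PySem.List.len_eq]; exact_mod_cast hlt
    rw [hcons]
    have hdrop : le1.drop j = le1[j] :: le1.drop (j + 1) := List.drop_eq_getElem_cons hlt
    have hget : PySem.List.pyGetD le1 (j : Int) 0 = le1[j] := by
      rw [PySem.List.pyGetD_natCast]
      exact List.getD_eq_getElem _ _ hlt
    have hstep : ((j : Int) + 1) = ((j + 1 : Nat) : Int) := by push_cast; ring
    simp only [checkInnerA, hget, hstep, ih (j + 1) (by omega), hdrop, List.all_cons]
    by_cases hv : le1[j] = -1 <;> simp [hv]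

lemma loopA_eq (le1 : List Int) : ∀ (fuel j : Nat), le1.length - j = fuel →
    checkLoopA le1 (PySem.List.pyRange (j : Int) (PySem.List.len le1 - 1) 1) =
      gSpec (le1.drop j) := by
  intro fuel
  induction fuel with
  | zero =>
    intro j hj
    have hge : le1.length ≤ j := by omega
    rw [pyRange_nil_of_le _ _ (by simp [PySem.List.len_eq]; omega)]
    rw [List.drop_eq_nil_of_le hge]
    rfl
  | succ n ih =>
    intro j hj
    have hlt : j < le1.length := by omega
    by_cases hlast : j + 1 = le1.length
    · rw [pyRange_nil_of_le _ _ (by simp [PySem.List.len_eq]; omega)]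
      have hdrop : le1.drop j = le1[j] :: le1.drop (j + 1) := List.drop_eq_getElem_cons hlt
      rw [hdrop, List.drop_eq_nil_of_le (by omega)]
      rfl
    · have hlt1 : j + 1 < le1.length := by omega
      have hcons : PySem.List.pyRange (j : Int) (PySem.List.len le1 - 1) 1
          = (j : Int) :: PySem.List.pyRange ((j : Int) + 1) (PySem.List.len le1 - 1) 1 := by
        apply PySem.List.pyRange_one_cons
        simp [PySem.List.len_eq]; omega
      rw [hcons]
      have hga : PySem.List.pyGetD le1 (j : Int) 0 = le1[j] := by
        rw [PySem.List.pyGetD_natCast]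
        exact List.getD_eq_getElem _ _ hlt
      have hstep : ((j : Int) + 1) = ((j + 1 : Nat) : Int) := by push_cast; ring
      have hgb : PySem.List.pyGetD le1 ((j : Int) + 1) 0 = le1[j + 1] := by
        rw [hstep, PySem.List.pyGetD_natCast]
        exact List.getD_eq_getElem _ _ hlt1
      have hdrop : le1.drop j = le1[j] :: le1.drop (j + 1) := List.drop_eq_getElem_cons hlt
      have hdrop1 : le1.drop (j + 1) = le1[j + 1] :: le1.drop (j + 2) := List.drop_eq_getElem_cons hlt1
      simp only [checkLoopA, hga, hgb, hdrop, hdrop1, gSpec]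
      by_cases h1 : le1[j + 1] - le1[j] < 0 ∧ 0 ≤ le1[j] ∧ 0 ≤ le1[j + 1]
      · simp [h1]
      · simp only [if_neg h1]
        by_cases h2 : le1[j] < 0 ∨ le1[j + 1] < 0
        · simp only [if_pos h2]
          rw [hstep, innerA_eq le1 (le1.length - (j + 1)) (j + 1) rfl, hdrop1]
        · simp only [if_neg h2]
          rw [hstep, ih (j + 1) (by omega), hdrop1]

lemma checkA_eq_gSpec (le1 : List Int) : check_ le1 = gSpec le1 := by
  have h := loopA_eq le1 le1.length 0 rfl
  simpa [check_] using h

lemma getD_map_succ (o : Option Nat) (n : Nat) :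
    (o.map (· + 1)).getD (n + 1) = o.getD n + 1 := by cases o <;> rfl

lemma altB_eq_gSpec : ∀ (le1 : List Int), ¬ D_check_ le1 → check__alt le1 = gSpec le1
  | [], _ => rfl
  | [x], hD => by
    by_cases hx : x < 0
    · have hx1 : x = -1 := by
        by_contra hne
        exact hD ⟨by simp, by simpa using hx, by simpa using hne, by simp⟩
      subst hx1; rfl
    · simp [check__alt, gSpec, List.findIdx?_cons, hx]
  | a :: b :: t, hD => by
    by_cases ha : a < 0
    · -- first negative at index 0: B checks the whole list, A checks (b :: t)
      have hF : (a :: b :: t).findIdx? (fun v => decide (v < 0)) = some 0 := by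
        simp [List.findIdx?_cons, ha]
      by_cases hall : ((b :: t).all (fun v => v == -1)) = true
      · have ha1 : a = -1 := by
          by_contra hne
          exact hD ⟨by simp, by simpa using ha, by simpa using hne, by simpa using hall⟩
        subst ha1
        simp only [check__alt, hF, Option.getD_some, List.take_zero, List.drop_zero,
          List.zip_nil_left, List.any_nil, Bool.false_eq_true, if_false, List.all_cons]
        simp only [gSpec, if_neg (by omega : ¬ (b - (-1) < 0 ∧ 0 ≤ (-1 : Int) ∧ 0 ≤ b)),
          if_pos (Or.inl (by norm_num : (-1 : Int) < 0)), List.all_cons]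
        simp only [List.all_cons] at hall
        simp [hall]
      · have hbt : ((b :: t).all (fun v => v == -1)) = false := by
          revert hall; cases h : ((b :: t).all (fun v => v == -1)) <;> simp
        simp only [check__alt, hF, Option.getD_some, List.take_zero, List.drop_zero,
          List.zip_nil_left, List.any_nil, Bool.false_eq_true, if_false, List.all_cons]
        simp only [List.all_cons] at hbt
        rw [hbt, Bool.and_false]
        simp only [gSpec, if_neg (by omega : ¬ (b - a < 0 ∧ 0 ≤ a ∧ 0 ≤ b)),
          if_pos (Or.inl ha), List.all_cons, hbt]
    · by_cases hb : b < 0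
      · -- first negative at index 1
        have hF : (a :: b :: t).findIdx? (fun v => decide (v < 0)) = some 1 := by
          simp [List.findIdx?_cons, ha, hb]
        simp only [check__alt, hF, Option.getD_some, List.take_succ_cons, List.take_zero,
          List.drop_succ_cons, List.drop_zero, List.zip_nil_right, List.any_nil,
          Bool.false_eq_true, if_false]
        simp only [gSpec, if_neg (by omega : ¬ (b - a < 0 ∧ 0 ≤ a ∧ 0 ≤ b)), if_pos (Or.inr hb)]
      · -- a, b both nonnegative: f_old ≥ 1 on (b :: t)
        have hmap : (a :: b :: t).findIdx? (fun v => decide (v < 0))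
            = ((b :: t).findIdx? (fun v => decide (v < 0))).map (· + 1) := by
          simp [List.findIdx?_cons, ha]
        have hmap2 : (b :: t).findIdx? (fun v => decide (v < 0))
            = (t.findIdx? (fun v => decide (v < 0))).map (· + 1) := by
          simp [List.findIdx?_cons, hb]
        set g := (t.findIdx? (fun v => decide (v < 0))).getD t.length with hg
        have hfold : ((b :: t).findIdx? (fun v => decide (v < 0))).getD (b :: t).length = g + 1 := by
          rw [hmap2]; exact getD_map_succ _ _
        have hfnew : ((a :: b :: t).findIdx? (fun v => decide (v < 0))).getD (a :: b :: t).length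
            = g + 2 := by
          rw [hmap]
          have := getD_map_succ ((b :: t).findIdx? (fun v => decide (v < 0))) (b :: t).length
          simp only [List.length_cons] at *
          rw [this, hfold]
        by_cases hba : a > b
        · -- descending nonnegative pair: both 0
          simp only [check__alt, hfnew]
          have htake : (a :: b :: t).take (g + 2) = a :: b :: t.take g := by simp
          rw [htake]
          simp only [List.drop_succ_cons, List.drop_zero, List.zip_cons_cons, List.any_cons]
          rw [(by simp [hba] : (decide (a > b)) = true)]
          simp only [Bool.true_or]
          simp [gSpec, (by omega : b - a < 0 ∧ 0 ≤ a ∧ 0 ≤ b)]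
        · -- ascending nonnegative pair: both sides reduce to (b :: t)
          have hDbt : ¬ D_check_ (b :: t) := by
            intro h; exact absurd h.2.1 (by simpa using hb)
          have ih := altB_eq_gSpec (b :: t) hDbt
          have hg2 : gSpec (a :: b :: t) = gSpec (b :: t) := by
            simp only [gSpec]
            rw [if_neg (by omega), if_neg (by omega)]
          rw [hg2, ← ih]
          simp only [check__alt, hfnew, hfold]
          have htake : (a :: b :: t).take (g + 2) = a :: b :: t.take g := by simp
          have htake2 : (b :: t).take (g + 1) = b :: t.take g := by simp
          rw [htake, htake2]
          simp only [List.drop_succ_cons, List.drop_zero, List.zip_cons_cons, List.any_cons]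
          rw [(by simp; omega : (decide (a > b)) = false)]
          rw [Bool.false_or]
          rfl

lemma A_eq_one_of_D (le1 : List Int) (hD : D_check_ le1) : check_ le1 = 1 := by
  rw [checkA_eq_gSpec]
  obtain ⟨hne, hhd, _, htl⟩ := hD
  match le1 with
  | [] => exact absurd rfl hne
  | [_] => rfl
  | a :: b :: t =>
    simp only [List.headD_cons] at hhd
    simp only [List.tail_cons] at htl
    simp only [gSpec, if_neg (by omega : ¬ (b - a < 0 ∧ 0 ≤ a ∧ 0 ≤ b)), if_pos (Or.inl hhd), htl]
    simp

lemma B_eq_zero_of_D (le1 : List Int) (hD : D_check_ le1) : check__alt le1 = 0 := by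
  obtain ⟨hne, hhd, hhd1, htl⟩ := hD
  match le1 with
  | [] => exact absurd rfl hne
  | a :: t =>
    simp only [List.headD_cons] at hhd hhd1
    simp only [List.tail_cons] at htl
    have hf : ((a :: t).findIdx? (fun v => decide (v < 0))).getD (a :: t).length = 0 := by
      simp [List.findIdx?_cons, hhd]
    simp only [check__alt, hf, List.take_zero, List.drop_zero, List.zip_nil_left, List.any_nil,
      Bool.false_eq_true, if_false, List.all_cons]
    rw [(by simpa using hhd1 : (a == -1) = false)]
    simp

-- ===== VERDICT (by name: the statements are the Claim_ definitions above) =====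
theorem check__spec : Claim_unchanged_check_ := by
  intro le1 _ hD
  rw [checkA_eq_gSpec, altB_eq_gSpec le1 hD]

theorem check__changed : Claim_changed_check_ := by
  unfold Claim_changed_check_; decide

theorem check__tight : Claim_exact_check_ := by
  intro le1 _ hD
  rw [A_eq_one_of_D le1 hD, B_eq_zero_of_D le1 hD]
  decide
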